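-- pv_equiv track=rewrite | github.com/miracle2k/feedplatform | feedplatform/test/template.py | evaluate_tag
-- ===== SOURCE A (Python) =====
-- import operator
--
-- def evaluate_tag(expr, current_pass):
--     """Tests ``expr`` against current pass, returns a bool.
--
--     Example input: 1, >1, =3, <2
--     """
--
--     # normalize: '\t> 5 ' => '>5'
--     expr = expr.strip().replace(' ', '')
--
--     p, v = expr[:2], expr[2:]             # two two char ops
--     if not p in ('>=', '<=',):
--         p, v = expr[:1], expr[1:]         # try one char ops
--         if not (p in '<>='):
--             # assume now op specified, >= is the default
--             p = '>='
--             v = expr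
--
--     # if the op is valid, the rest must be a number
--     if not v.isdigit():
--         raise ValueError("'%s' not a valid tag expression " % expr)
--
--     value = int(v)
--     ops = {'=': (operator.eq,),
--            '>': (operator.gt,),
--            '<': (operator.lt,),
--            '>=': (operator.gt, operator.eq),
--            '<=': (operator.lt, operator.eq)}[p]
--     return any([op(current_pass, value) for op in ops])
-- ===== SOURCE B (Python) =====
-- import operator
-- import re
--
-- _EXPR_RE = re.compile(r'(>=|<=|[<>=])?(.+)', re.DOTALL)
-- _OPS = {'=': operator.eq, '>': operator.gt, '<': operator.lt,
--         '>=': operator.ge, '<=': operator.le}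
--
-- def evaluate_tag(expr, current_pass):
--     """Tests ``expr`` against current pass, returns a bool."""
--     expr = expr.strip().replace(' ', '')
--     m = _EXPR_RE.fullmatch(expr)
--     if m is None or not m.group(2).isdigit():
--         raise ValueError("'%s' not a valid tag expression " % expr)
--     return _OPS[m.group(1) or '>='](current_pass, int(m.group(2)))
-- ===== Notes on version B (the rewrite author's own statement) =====
-- stated objective: idiomatic
-- what changed: Replaces A's manual two-char/one-char slice fallback and the any([op(...) for op in ops]) tuple dispatch with a single regex fullmatch ((>=|<=|[<>=])?(.+)) and a direct operator table using operator.ge/operator.le.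
import Mathlib
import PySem

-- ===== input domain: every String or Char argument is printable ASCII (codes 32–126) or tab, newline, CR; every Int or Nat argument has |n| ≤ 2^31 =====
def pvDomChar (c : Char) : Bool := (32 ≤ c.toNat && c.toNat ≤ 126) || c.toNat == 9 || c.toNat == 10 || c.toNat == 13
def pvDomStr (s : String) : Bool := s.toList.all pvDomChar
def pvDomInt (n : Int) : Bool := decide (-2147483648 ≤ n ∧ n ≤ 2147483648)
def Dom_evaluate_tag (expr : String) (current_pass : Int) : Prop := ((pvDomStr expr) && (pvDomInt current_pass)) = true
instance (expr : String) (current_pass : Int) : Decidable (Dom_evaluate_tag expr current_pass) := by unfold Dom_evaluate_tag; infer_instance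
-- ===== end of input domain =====

-- B parses the expression with a single regex-style pattern match and uses ge/le directly
-- instead of A's two-char/one-char slicing fallback and any([gt,eq]) tuple; objective: idiomatic.
-- Where the Python raises ValueError (excluded by Pre_), both ports return false.

-- ===== PORT A =====
-- core of A after the normalization 'expr.strip().replace(" ", "")', on the char list
def pvEvalA (l : List Char) (current_pass : Int) : Bool :=
  let pv :=
    let p0 := l.take 2
    if p0 = ['>', '='] ∨ p0 = ['<', '='] then (p0, l.drop 2)
    else
      let p1 := l.take 1
      -- Python `p in '<>='` is true for '' and for each of the three one-char ops
      if p1 = [] ∨ p1 = ['<'] ∨ p1 = ['>'] ∨ p1 = ['='] then (p1, l.drop 1)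
      else (['>', '='], l)
  let p := pv.1
  let v := pv.2
  if PySem.Chars.strIsdigit v = false then false  -- Python: raise ValueError (outside Pre_)
  else
    let value := (PySem.Int.ofChars? v).getD 0    -- int(v); v is all digits, so int() succeeds
    if p = ['='] then decide (current_pass = value)
    else if p = ['>'] then decide (value < current_pass)
    else if p = ['<'] then decide (current_pass < value)
    else if p = ['>', '='] then (decide (value < current_pass) || decide (current_pass = value))
    else if p = ['<', '='] then (decide (current_pass < value) || decide (current_pass = value))
    else false  -- unreachable: p = '' forces v = '' which is not a digit string

def evaluate_tag (expr : String) (current_pass : Int) : Bool :=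
  pvEvalA (PySem.Str.replace (PySem.Str.strip expr) " " "").toList current_pass

-- ===== PORT B =====
inductive PvOp | eq | gt | lt | ge | le
deriving DecidableEq, Repr

-- fullmatch of r'(>=|<=|[<>=])?(.+)' with the regex engine's backtracking ('>=': op '>' num '=')
def pvRegexParse : List Char → Option (PvOp × List Char)
  | [] => none
  | '>' :: '=' :: c :: rest => some (PvOp.ge, c :: rest)
  | '<' :: '=' :: c :: rest => some (PvOp.le, c :: rest)
  | '>' :: c :: rest => some (PvOp.gt, c :: rest)
  | '<' :: c :: rest => some (PvOp.lt, c :: rest)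
  | '=' :: c :: rest => some (PvOp.eq, c :: rest)
  | l => some (PvOp.ge, l)

def pvApplyOp : PvOp → Int → Int → Bool
  | PvOp.eq, a, b => decide (a = b)
  | PvOp.gt, a, b => decide (b < a)
  | PvOp.lt, a, b => decide (a < b)
  | PvOp.ge, a, b => decide (b ≤ a)
  | PvOp.le, a, b => decide (a ≤ b)

def pvEvalB (l : List Char) (current_pass : Int) : Bool :=
  match pvRegexParse l with
  | none => false                                  -- Python: raise ValueError (outside Pre_)
  | some (op, num) =>
    if PySem.Chars.strIsdigit num then
      pvApplyOp op current_pass ((PySem.Int.ofChars? num).getD 0)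
    else false                                     -- Python: raise ValueError (outside Pre_)

def evaluate_tag_alt (expr : String) (current_pass : Int) : Bool :=
  pvEvalB (PySem.Str.replace (PySem.Str.strip expr) " " "").toList current_pass

-- ===== PRECONDITION & SPEC =====
-- the number part of the normalized expression, as A slices it
def pvParsedNum : List Char → List Char
  | '>' :: '=' :: rest => rest
  | '<' :: '=' :: rest => rest
  | c :: rest => if c = '>' ∨ c = '<' ∨ c = '=' then rest else c :: rest
  | [] => []

-- Pre_ admits exactly the inputs where Python A returns (otherwise both Pythons raise ValueError):
-- after stripping/removing spaces, what follows the (optional) operator must be a nonempty digit string.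
def Pre_evaluate_tag (expr : String) (current_pass : Int) : Prop :=
  PySem.Chars.strIsdigit (pvParsedNum (PySem.Str.replace (PySem.Str.strip expr) " " "").toList) = true
instance (expr : String) (current_pass : Int) : Decidable (Pre_evaluate_tag expr current_pass) := by
  unfold Pre_evaluate_tag; infer_instance

def pvWitness_evaluate_tag : String × Int := (" >= 3", 4)

def Spec_evaluate_tag (expr : String) (current_pass : Int) (out : Bool) : Prop :=
  out = evaluate_tag_alt expr current_pass
instance (expr : String) (current_pass : Int) (out : Bool) : Decidable (Spec_evaluate_tag expr current_pass out) := by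
  unfold Spec_evaluate_tag; infer_instance

-- ===== CLAIM (what is proved, stated in full; the proofs are below) =====
def Claim_equal_evaluate_tag : Prop := ∀ (expr : String) (current_pass : Int), Dom_evaluate_tag expr current_pass → Pre_evaluate_tag expr current_pass → Spec_evaluate_tag expr current_pass (evaluate_tag expr current_pass)

-- ===== LEMMAS AND PROOFS =====
theorem pv_ge_or (a b : Int) : (decide (b < a) || decide (a = b)) = decide (b ≤ a) := by
  apply Bool.eq_iff_iff.mpr
  simp only [Bool.or_eq_true, decide_eq_true_eq]
  omega

theorem pv_le_or (a b : Int) : (decide (a < b) || decide (a = b)) = decide (a ≤ b) := by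
  apply Bool.eq_iff_iff.mpr
  simp only [Bool.or_eq_true, decide_eq_true_eq]
  omega

theorem pv_sd_nil : PySem.Chars.strIsdigit [] = false := by decide
theorem pv_sd_gt : PySem.Chars.strIsdigit ['>'] = false := by decide
theorem pv_sd_lt : PySem.Chars.strIsdigit ['<'] = false := by decide
theorem pv_sd_eq : PySem.Chars.strIsdigit ['='] = false := by decide

-- the two cores agree on every char list (on raising inputs both return false)
theorem pvEval_eq (l : List Char) (cp : Int) : pvEvalA l cp = pvEvalB l cp := by
  match l with
  | [] => rfl
  | [c] =>
    by_cases h1 : c = '>' <;> by_cases h2 : c = '<' <;> by_cases h3 : c = '=' <;>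
      simp_all [pvEvalA, pvEvalB, pvRegexParse, pvApplyOp, pv_ge_or,
        pv_sd_nil, pv_sd_gt, pv_sd_lt, pv_sd_eq]
  | [c1, c2] =>
    by_cases h1 : c1 = '>' <;> by_cases h2 : c1 = '<' <;> by_cases h3 : c1 = '=' <;>
      by_cases h4 : c2 = '=' <;>
      simp_all [pvEvalA, pvEvalB, pvRegexParse, pvApplyOp, pv_ge_or, pv_le_or,
        pv_sd_nil, pv_sd_gt, pv_sd_lt, pv_sd_eq]
  | c1 :: c2 :: c3 :: rest =>
    by_cases h1 : c1 = '>' <;> by_cases h2 : c1 = '<' <;> by_cases h3 : c1 = '=' <;>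
      by_cases h4 : c2 = '=' <;>
      simp_all [pvEvalA, pvEvalB, pvRegexParse, pvApplyOp, pv_ge_or, pv_le_or,
        pv_sd_nil, pv_sd_gt, pv_sd_lt, pv_sd_eq]

-- ===== VERDICT (by name: the statement is the Claim_ definition above) =====
theorem evaluate_tag_spec : Claim_equal_evaluate_tag := by
  intro expr cp _ _
  unfold Spec_evaluate_tag evaluate_tag evaluate_tag_alt
  exact pvEval_eq _ cp
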